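-- pv_equiv track=rewrite | github.com/AngoAmit/DNA-try1 | try7.py | find_most_similar_segment
-- ===== SOURCE A (Python) =====
-- def calculate_edit_distance_with_markers(seq1, seq2):
--     """
--     Calculate the edit distance between two sequences, seq1 and seq2, and annotate transformations.
--     """
--     m, n = len(seq1), len(seq2)
--     dp = [[[0, ''] for _ in range(n + 1)] for _ in range(m + 1)]
--
--     for i in range(1, m + 1):
--         dp[i][0] = [i, dp[i-1][0][1] + f"{i}del({seq1[i-1]}) "]
--     for j in range(1, n + 1):
--         dp[0][j] = [j, dp[0][j-1][1] + f"{j}ins({seq2[j-1]}) "]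
--
--     for i in range(1, m + 1):
--         for j in range(1, n + 1):
--             if seq1[i-1] == seq2[j-1]:
--                 dp[i][j] = [dp[i-1][j-1][0], dp[i-1][j-1][1]]
--             else:
--                 choices = [
--                     (dp[i-1][j][0] + 1, dp[i-1][j][1] + f"{i}del({seq1[i-1]}) "),
--                     (dp[i][j-1][0] + 1, dp[i][j-1][1] + f"{i}ins({seq2[j-1]}) "),
--                     (dp[i-1][j-1][0] + 1, dp[i-1][j-1][1] + f"{i}sub({seq1[i-1]}->{seq2[j-1]}) ")
--                 ]
--                 dp[i][j] = min(choices, key=lambda x: x[0])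
--
--     return dp[m][n][0], dp[m][n][1].strip()
--
-- def find_most_similar_segment(seq1, seq2):
--     min_distance = float('inf')
--     best_segment = ''
--     best_operations = ''
--
--     for i in range(len(seq1) - len(seq2) + 1):
--         segment = seq1[i:i + len(seq2)]
--         distance, operations = calculate_edit_distance_with_markers(segment, seq2)
--         if distance < min_distance:
--             min_distance = distance
--             best_segment = segment
--             best_operations = operations
--             segment_index = i
--
--     marked_sequence = seq1[:segment_index] + '*' + seq1[segment_index:segment_index + len(seq2)] + '*' + seq1[segment_index + len(seq2):]
--     return marked_sequence, min_distance, best_operations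
-- ===== SOURCE B (Python) =====
-- def find_most_similar_segment(seq1, seq2):
--     n = len(seq2)
--
--     def dist_table(seg):
--         # plain integer edit-distance matrix, same recurrence as A but no strings
--         m = len(seg)
--         dp = [list(range(n + 1))] + [[i] + [0] * n for i in range(1, m + 1)]
--         for i in range(1, m + 1):
--             for j in range(1, n + 1):
--                 if seg[i - 1] == seq2[j - 1]:
--                     dp[i][j] = dp[i - 1][j - 1]
--                 else:
--                     dp[i][j] = 1 + min(dp[i - 1][j], dp[i][j - 1], dp[i - 1][j - 1])
--         return dp
--
--     def backtrack(seg, dp):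
--         # reconstruct the annotation by walking back from (m, n); preference del, ins, sub
--         i, j = len(seg), n
--         toks = []
--         while i > 0 or j > 0:
--             if i > 0 and j > 0 and seg[i - 1] == seq2[j - 1]:
--                 i, j = i - 1, j - 1
--                 continue
--             cur = dp[i][j]
--             if i > 0 and j > 0:
--                 if dp[i - 1][j] + 1 == cur:
--                     toks.append(f"{i}del({seg[i - 1]})"); i -= 1
--                 elif dp[i][j - 1] + 1 == cur:
--                     toks.append(f"{i}ins({seq2[j - 1]})"); j -= 1
--                 else:
--                     toks.append(f"{i}sub({seg[i - 1]}->{seq2[j - 1]})"); i, j = i - 1, j - 1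
--             elif i > 0:
--                 toks.append(f"{i}del({seg[i - 1]})"); i -= 1
--             else:
--                 toks.append(f"{j}ins({seq2[j - 1]})"); j -= 1
--         toks.reverse()
--         return " ".join(toks)
--
--     best_i = min(range(len(seq1) - n + 1),
--                  key=lambda i: dist_table(seq1[i:i + n])[n][n])
--     seg = seq1[best_i:best_i + n]
--     dp = dist_table(seg)
--     marked = seq1[:best_i] + '*' + seg + '*' + seq1[best_i + n:]
--     return marked, dp[n][n], backtrack(seg, dp)
-- ===== Notes on version B (the rewrite author's own statement) =====
-- stated objective: faster
-- what changed: A stores a growing operations string in every DP cell and picks min(choices) per cell; B fills a plain integer edit-distance matrix and reconstructs the operations string once by backtracking from (n,n) with the same del/ins/sub preference, finding the best window with min(range, key=distance).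
import Mathlib
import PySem

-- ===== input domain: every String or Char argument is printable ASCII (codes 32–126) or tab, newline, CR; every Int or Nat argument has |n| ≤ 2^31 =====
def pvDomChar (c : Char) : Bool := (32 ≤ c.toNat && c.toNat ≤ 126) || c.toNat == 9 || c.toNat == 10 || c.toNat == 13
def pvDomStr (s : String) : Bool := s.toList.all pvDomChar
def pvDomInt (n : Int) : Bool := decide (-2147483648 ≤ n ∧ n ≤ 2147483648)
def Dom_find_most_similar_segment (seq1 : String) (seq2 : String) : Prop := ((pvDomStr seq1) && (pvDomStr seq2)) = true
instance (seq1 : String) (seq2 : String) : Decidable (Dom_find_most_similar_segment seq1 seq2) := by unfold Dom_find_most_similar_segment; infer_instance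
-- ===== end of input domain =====

-- B replaces A's per-cell annotation-string DP (each cell stores a growing operations string)
-- by a plain integer distance matrix plus a single backtracking pass that rebuilds the
-- operations string once; window search and marking are unchanged in behaviour.

-- ===== PORT A =====
-- token strings: f"{i}del(c)", f"{i}ins(c)", f"{i}sub(a->b)" (without the trailing space)
def pvTokDel (i : Nat) (c : Char) : List Char :=
  PySem.Int.toChars (i : Int) ++ ('d' :: 'e' :: 'l' :: '(' :: c :: ')' :: [])
def pvTokIns (i : Nat) (c : Char) : List Char :=
  PySem.Int.toChars (i : Int) ++ ('i' :: 'n' :: 's' :: '(' :: c :: ')' :: [])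
def pvTokSub (i : Nat) (a b : Char) : List Char :=
  PySem.Int.toChars (i : Int) ++ ('s' :: 'u' :: 'b' :: '(' :: a :: '-' :: '>' :: b :: ')' :: [])

-- 'distance < min_distance' with min_distance = float('inf') until the first window: None = inf
def pvBetter (md : Option Int) (d : Int) : Bool :=
  match md with
  | none => true
  | some d0 => decide (d < d0)

-- A's dp table, cell (i, j): (distance, annotation string with a trailing space per token)
def pvDpA (s t : List Char) : Nat → Nat → Int × List Char
  | 0, 0 => (0, [])
  | i+1, 0 =>
      let p := pvDpA s t i 0
      ((i : Int) + 1, p.2 ++ pvTokDel (i+1) (s.getD i ' ') ++ [' '])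
  | 0, j+1 =>
      let p := pvDpA s t 0 j
      ((j : Int) + 1, p.2 ++ pvTokIns (j+1) (t.getD j ' ') ++ [' '])
  | i+1, j+1 =>
      if s.getD i ' ' = t.getD j ' ' then pvDpA s t i j
      else
        let pd := pvDpA s t i (j+1)
        let pi := pvDpA s t (i+1) j
        let ps := pvDpA s t i j
        let c1 := (pd.1 + 1, pd.2 ++ pvTokDel (i+1) (s.getD i ' ') ++ [' '])
        let c2 := (pi.1 + 1, pi.2 ++ pvTokIns (i+1) (t.getD j ' ') ++ [' '])
        let c3 := (ps.1 + 1, ps.2 ++ pvTokSub (i+1) (s.getD i ' ') (t.getD j ' ') ++ [' '])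
        -- min(choices, key=first component): left fold, strict <, keeps the first minimum
        let m2 := if c2.1 < c1.1 then c2 else c1
        if c3.1 < m2.1 then c3 else m2
  termination_by i j => (i, j)

def pvCalcA (s t : List Char) : Int × List Char :=
  let r := pvDpA s t s.length t.length
  (r.1, PySem.Chars.strip r.2)

def find_most_similar_segment (seq1 : String) (seq2 : String) : String × Int × String :=
  let s1 := seq1.toList
  let s2 := seq2.toList
  let idxs := PySem.List.pyRange 0 ((s1.length : Int) - (s2.length : Int) + 1) 1
  let st := idxs.foldl
    (fun (st : Option Int × List Char × List Char × Option Int) i =>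
      let seg := PySem.List.slice s1 (some i) (some (i + (s2.length : Int)))
      let r := pvCalcA seg s2
      if pvBetter st.1 r.1 then (some r.1, seg, r.2, some i) else st)
    (none, [], [], none)
  match st with
  | (some d, _, ops, some k) =>
      let marked := PySem.List.slice s1 none (some k) ++ ['*'] ++
        PySem.List.slice s1 (some k) (some (k + (s2.length : Int))) ++ ['*'] ++
        PySem.List.slice s1 (some (k + (s2.length : Int))) none
      (String.ofList marked, d, String.ofList ops)
  | _ => ("", 0, "")   -- Python raises UnboundLocalError here (len(seq2) > len(seq1)); outside Pre_

-- ===== PORT B =====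
-- plain integer edit-distance table, same recurrence, no strings
def pvDB (s t : List Char) : Nat → Nat → Int
  | 0, j => (j : Int)
  | i+1, 0 => (i : Int) + 1
  | i+1, j+1 =>
      if s.getD i ' ' = t.getD j ' ' then pvDB s t i j
      else 1 + min (min (pvDB s t i (j+1)) (pvDB s t (i+1) j)) (pvDB s t i j)
  termination_by i j => (i, j)

-- backtracking from (i, j) to (0, 0); tokens come out in reverse order, no trailing spaces
def pvBT (s t : List Char) : Nat → Nat → List (List Char)
  | 0, 0 => []
  | i+1, 0 => pvTokDel (i+1) (s.getD i ' ') :: pvBT s t i 0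
  | 0, j+1 => pvTokIns (j+1) (t.getD j ' ') :: pvBT s t 0 j
  | i+1, j+1 =>
      if s.getD i ' ' = t.getD j ' ' then pvBT s t i j
      else
        let cur := pvDB s t (i+1) (j+1)
        if pvDB s t i (j+1) + 1 = cur then pvTokDel (i+1) (s.getD i ' ') :: pvBT s t i (j+1)
        else if pvDB s t (i+1) j + 1 = cur then pvTokIns (i+1) (t.getD j ' ') :: pvBT s t (i+1) j
        else pvTokSub (i+1) (s.getD i ' ') (t.getD j ' ') :: pvBT s t i j
  termination_by i j => (i, j)

def pvDistB (s t : List Char) : Int := pvDB s t s.length t.length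

def pvOpsB (s t : List Char) : List Char :=
  PySem.Chars.join [' '] ((pvBT s t s.length t.length).reverse)

def find_most_similar_segment_alt (seq1 : String) (seq2 : String) : String × Int × String :=
  let s1 := seq1.toList
  let s2 := seq2.toList
  let idxs := PySem.List.pyRange 0 ((s1.length : Int) - (s2.length : Int) + 1) 1
  match PySem.List.min? idxs
      (fun i => pvDistB (PySem.List.slice s1 (some i) (some (i + (s2.length : Int)))) s2) with
  | none => ("", 0, "")   -- Python raises ValueError (min of empty range); outside Pre_
  | some k =>
      let seg := PySem.List.slice s1 (some k) (some (k + (s2.length : Int)))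
      let marked := PySem.List.slice s1 none (some k) ++ ['*'] ++ seg ++ ['*'] ++
        PySem.List.slice s1 (some (k + (s2.length : Int))) none
      (String.ofList marked, pvDistB seg s2, String.ofList (pvOpsB seg s2))

-- ===== PRECONDITION & SPEC =====
-- Pre_ excludes len(seq2) > len(seq1): there the window loop never runs and Python A raises
-- UnboundLocalError (segment_index unbound); B raises ValueError (min of an empty range).
def Pre_find_most_similar_segment (seq1 : String) (seq2 : String) : Prop :=
  PySem.Str.len seq2 ≤ PySem.Str.len seq1
instance (seq1 : String) (seq2 : String) : Decidable (Pre_find_most_similar_segment seq1 seq2) := by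
  unfold Pre_find_most_similar_segment; infer_instance

def pvWitness_find_most_similar_segment : String × String := ("abca", "ba")

def Spec_find_most_similar_segment (seq1 : String) (seq2 : String) (out : String × Int × String) : Prop := out = find_most_similar_segment_alt seq1 seq2
instance (seq1 : String) (seq2 : String) (out : String × Int × String) : Decidable (Spec_find_most_similar_segment seq1 seq2 out) := by unfold Spec_find_most_similar_segment; infer_instance

-- ===== CLAIM (what is proved, stated in full; the proofs are below) =====
def Claim_equal_find_most_similar_segment : Prop := ∀ (seq1 : String) (seq2 : String), Dom_find_most_similar_segment seq1 seq2 → Pre_find_most_similar_segment seq1 seq2 → Spec_find_most_similar_segment seq1 seq2 (find_most_similar_segment seq1 seq2)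

-- ===== LEMMAS AND PROOFS =====

-- A's annotation string of a reversed token list: forward concatenation, one trailing space each
def pvCat (ts : List (List Char)) : List Char :=
  match ts with
  | [] => []
  | x :: xs => pvCat xs ++ x ++ [' ']

-- a token is nonempty and has non-space characters at both ends
def pvSolid (tok : List Char) : Prop :=
  ∃ c d tl, tok = c :: tl ∧ tok.getLast? = some d ∧
    PySem.Chars.isspace c = false ∧ PySem.Chars.isspace d = false

theorem pv_digitChar_star (n : Nat) : Nat.digitChar (n+16) = '*' := by
  rw [Nat.digitChar]
  repeat rw [if_neg (by omega)]

theorem pv_digitChar_not_space (m : Nat) : PySem.Chars.isspace (Nat.digitChar m) = false :=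
  match m with
  | 0 => by decide
  | 1 => by decide
  | 2 => by decide
  | 3 => by decide
  | 4 => by decide
  | 5 => by decide
  | 6 => by decide
  | 7 => by decide
  | 8 => by decide
  | 9 => by decide
  | 10 => by decide
  | 11 => by decide
  | 12 => by decide
  | 13 => by decide
  | 14 => by decide
  | 15 => by decide
  | (n+16) => by rw [pv_digitChar_star]; decide

theorem pv_toDigitsCore_head (f n : Nat) (l : List Char) (hf : 0 < f) :
    ∃ m rest, Nat.toDigitsCore 10 f n l = Nat.digitChar m :: rest := by
  induction f generalizing n l with
  | zero => omega
  | succ f ih =>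
      rw [Nat.toDigitsCore]
      by_cases h : n / 10 = 0
      · simp [h]
      · simp only [h, if_false]
        rcases Nat.eq_zero_or_pos f with hf0 | hf0
        · subst hf0; rw [Nat.toDigitsCore]; exact ⟨n % 10, l, rfl⟩
        · simpa using ih (n / 10) (Nat.digitChar (n % 10) :: l) hf0

theorem pv_toChars_head (k : Nat) :
    ∃ m rest, PySem.Int.toChars (k : Int) = Nat.digitChar m :: rest := by
  have : ¬ ((k : Int) < 0) := Int.not_lt.mpr (Int.natCast_nonneg k)
  simp only [PySem.Int.toChars, this, if_false, Int.toNat_natCast]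
  exact pv_toDigitsCore_head (k + 1) k [] (by omega)

theorem pv_tok_solid_aux (k : Nat) (suf : List Char) (c : Char)
    (h : suf.getLast? = some c) (hc : PySem.Chars.isspace c = false) :
    pvSolid (PySem.Int.toChars (k : Int) ++ suf) := by
  obtain ⟨m, rest, hm⟩ := pv_toChars_head k
  refine ⟨Nat.digitChar m, c, rest ++ suf, by rw [hm]; rfl, ?_, pv_digitChar_not_space m, hc⟩
  rw [hm]
  have hsuf : suf ≠ [] := by intro h'; subst h'; simp at h
  rw [List.getLast?_append_of_ne_nil _ hsuf, h]

theorem pv_tokDel_solid (k : Nat) (c : Char) : pvSolid (pvTokDel k c) :=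
  pv_tok_solid_aux k _ ')' rfl (by decide)
theorem pv_tokIns_solid (k : Nat) (c : Char) : pvSolid (pvTokIns k c) :=
  pv_tok_solid_aux k _ ')' rfl (by decide)
theorem pv_tokSub_solid (k : Nat) (a b : Char) : pvSolid (pvTokSub k a b) :=
  pv_tok_solid_aux k _ ')' rfl (by decide)

theorem pv_bt_solid (s t : List Char) (i j : Nat) :
    ∀ tok ∈ pvBT s t i j, pvSolid tok := by
  fun_induction pvBT s t i j with
  | case1 => simp
  | case2 i ih =>
      intro tok htok
      rcases List.mem_cons.mp htok with h | h
      · exact h ▸ pv_tokDel_solid _ _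
      · exact ih _ h
  | case3 j ih =>
      intro tok htok
      rcases List.mem_cons.mp htok with h | h
      · exact h ▸ pv_tokIns_solid _ _
      · exact ih _ h
  | case4 i j heq ih => exact ih
  | case5 i j hne cur h1 ih =>
      intro tok htok
      rcases List.mem_cons.mp htok with h | h
      · exact h ▸ pv_tokDel_solid _ _
      · exact ih _ h
  | case6 i j hne cur h1 h2 ih =>
      intro tok htok
      rcases List.mem_cons.mp htok with h | h
      · exact h ▸ pv_tokIns_solid _ _
      · exact ih _ h
  | case7 i j hne cur h1 h2 ih =>
      intro tok htok
      rcases List.mem_cons.mp htok with h | h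
      · exact h ▸ pv_tokSub_solid _ _ _
      · exact ih _ h

-- the main DP lemma: A's cell equals B's distance and the rendering of B's backtrack
theorem pvDB_ss (s t : List Char) (i j : Nat) (hne : ¬ s.getD i ' ' = t.getD j ' ') :
    pvDB s t (i+1) (j+1)
      = 1 + min (pvDB s t i (j+1)) (min (pvDB s t (i+1) j) (pvDB s t i j)) := by
  have hne' : ¬ s[i]?.getD ' ' = t[j]?.getD ' ' := hne
  simp [pvDB, hne']

theorem pvBT_ss_del (s t : List Char) (i j : Nat) (hne : ¬ s.getD i ' ' = t.getD j ' ')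
    (h1 : pvDB s t i (j+1) ≤ pvDB s t (i+1) j) (h2 : pvDB s t i (j+1) ≤ pvDB s t i j) :
    pvBT s t (i+1) (j+1) = pvTokDel (i+1) (s.getD i ' ') :: pvBT s t i (j+1) := by
  have hne' : ¬ s[i]?.getD ' ' = t[j]?.getD ' ' := hne
  have hDB := pvDB_ss s t i j hne
  have hc1 : pvDB s t i (j+1) + 1 = pvDB s t (i+1) (j+1) := by rw [hDB]; omega
  simp [pvBT, hne', hc1]

theorem pvBT_ss_ins (s t : List Char) (i j : Nat) (hne : ¬ s.getD i ' ' = t.getD j ' ')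
    (h1 : pvDB s t (i+1) j < pvDB s t i (j+1)) (h2 : pvDB s t (i+1) j ≤ pvDB s t i j) :
    pvBT s t (i+1) (j+1) = pvTokIns (i+1) (t.getD j ' ') :: pvBT s t (i+1) j := by
  have hne' : ¬ s[i]?.getD ' ' = t[j]?.getD ' ' := hne
  have hDB := pvDB_ss s t i j hne
  have hc1 : ¬ (pvDB s t i (j+1) + 1 = pvDB s t (i+1) (j+1)) := by rw [hDB]; omega
  have hc2 : pvDB s t (i+1) j + 1 = pvDB s t (i+1) (j+1) := by rw [hDB]; omega
  simp [pvBT, hne', hc1, hc2]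

theorem pvBT_ss_sub (s t : List Char) (i j : Nat) (hne : ¬ s.getD i ' ' = t.getD j ' ')
    (h1 : pvDB s t i j < pvDB s t i (j+1)) (h2 : pvDB s t i j < pvDB s t (i+1) j) :
    pvBT s t (i+1) (j+1)
      = pvTokSub (i+1) (s.getD i ' ') (t.getD j ' ') :: pvBT s t i j := by
  have hne' : ¬ s[i]?.getD ' ' = t[j]?.getD ' ' := hne
  have hDB := pvDB_ss s t i j hne
  have hc1 : ¬ (pvDB s t i (j+1) + 1 = pvDB s t (i+1) (j+1)) := by rw [hDB]; omega
  have hc2 : ¬ (pvDB s t (i+1) j + 1 = pvDB s t (i+1) (j+1)) := by rw [hDB]; omega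
  simp [pvBT, hne', hc1, hc2]

theorem pv_dp_eq (s t : List Char) (i j : Nat) :
    pvDpA s t i j = (pvDB s t i j, pvCat (pvBT s t i j)) := by
  fun_induction pvDpA s t i j with
  | case1 => simp [pvDB, pvBT, pvCat]
  | case2 i p ih => simp [pvDB, pvBT, pvCat, p, ih]
  | case3 j p ih => simp [pvDB, pvBT, pvCat, p, ih]
  | case4 i j heq ih =>
      have heq' : s[i]?.getD ' ' = t[j]?.getD ' ' := heq
      simp [pvDB, pvBT, heq', ih]
  | case5 i j hne pd pi ps c1 c2 c3 m2 h ih3 ih2 ih1 =>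
      -- sub chosen
      simp only [m2, c1, c2, c3, pd, pi, ps, ih1, ih2, ih3] at h ⊢
      have hcb : pvDB s t i j < pvDB s t (i+1) j ∧ pvDB s t i j < pvDB s t i (j+1) := by
        by_cases hA : pvDB s t (i+1) j + 1 < pvDB s t i (j+1) + 1
        · rw [dif_pos hA] at h; simp at h; omega
        · rw [dif_neg hA] at h; simp at h; omega
      rw [pvBT_ss_sub s t i j hne hcb.2 hcb.1, pvDB_ss s t i j hne]
      refine Prod.ext ?_ ?_
      · simp; omega
      · simp [pvCat]
  | case6 i j hne pd pi ps c1 c2 c3 m2 h ih3 ih2 ih1 =>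
      simp only [m2, c1, c2, c3, pd, pi, ps, ih1, ih2, ih3] at h ⊢
      by_cases hA : pvDB s t (i+1) j + 1 < pvDB s t i (j+1) + 1
      · -- ins chosen
        rw [dif_pos hA] at h ⊢; simp at h
        have hle : pvDB s t (i+1) j ≤ pvDB s t i j := by omega
        rw [pvBT_ss_ins s t i j hne (by omega) hle, pvDB_ss s t i j hne]
        refine Prod.ext ?_ ?_
        · simp; omega
        · simp [pvCat]
      · -- del chosen
        rw [dif_neg hA] at h ⊢; simp at h
        have hle1 : pvDB s t i (j+1) ≤ pvDB s t (i+1) j := by omega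
        have hle2 : pvDB s t i (j+1) ≤ pvDB s t i j := by omega
        rw [pvBT_ss_del s t i j hne hle1 hle2, pvDB_ss s t i j hne]
        refine Prod.ext ?_ ?_
        · simp; omega
        · simp [pvCat]

-- strip of the forward rendering is the join of the forward token list
-- forward rendering: each token followed by one space
def pvFwd (l : List (List Char)) : List Char := (l.map (fun tok => tok ++ [' '])).flatten

theorem pv_cat_eq_fwd (ts : List (List Char)) : pvCat ts = pvFwd ts.reverse := by
  induction ts with
  | nil => rfl
  | cons x xs ih => simp [pvCat, pvFwd, ih]

theorem pv_inter_cons_cons (s x y : List Char) (tl : List (List Char)) :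
    List.intercalate s (x :: y :: tl) = x ++ s ++ List.intercalate s (y :: tl) := by
  simp [List.intercalate, List.intersperse]

theorem pv_fwd_inter (l : List (List Char)) (hl : l ≠ []) :
    pvFwd l = List.intercalate [' '] l ++ [' '] := by
  induction l with
  | nil => exact absurd rfl hl
  | cons x xs ih =>
      cases xs with
      | nil => simp [pvFwd, List.intercalate]
      | cons y tl =>
          rw [pv_inter_cons_cons]
          simp only [pvFwd, List.map_cons, List.flatten_cons] at ih ⊢
          rw [ih (by simp)]
          simp

theorem pv_inter_head (l : List (List Char)) (hl : l ≠ []) (h : ∀ tok ∈ l, pvSolid tok) :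
    ∃ c ys, List.intercalate [' '] l = c :: ys ∧ PySem.Chars.isspace c = false := by
  cases l with
  | nil => exact absurd rfl hl
  | cons x xs =>
      obtain ⟨c, d, tl, hx, _, hc, _⟩ := h x (by simp)
      cases xs with
      | nil => exact ⟨c, tl, by simp [List.intercalate, hx], hc⟩
      | cons y ys =>
          rw [pv_inter_cons_cons, hx]
          exact ⟨c, tl ++ [' '] ++ List.intercalate [' '] (y :: ys), by simp, hc⟩

theorem pv_inter_last (l : List (List Char)) (hl : l ≠ []) (h : ∀ tok ∈ l, pvSolid tok) :
    ∃ zs d, List.intercalate [' '] l = zs ++ [d] ∧ PySem.Chars.isspace d = false := by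
  induction l with
  | nil => exact absurd rfl hl
  | cons x xs ih =>
      cases xs with
      | nil =>
          obtain ⟨c, d, tl, hx, hlast, _, hd⟩ := h x (by simp)
          refine ⟨x.dropLast, d, ?_, hd⟩
          have h1 : List.intercalate [' '] [x] = x := by simp [List.intercalate]
          rw [h1]
          exact (List.dropLast_append_getLast? d hlast).symm
      | cons y ys =>
          obtain ⟨zs, d, hzs, hd⟩ := ih (by simp) (fun tok ht => h tok (by simp [ht]))
          rw [pv_inter_cons_cons, hzs]
          exact ⟨x ++ [' '] ++ zs, d, by simp, hd⟩

theorem pv_strip_fwd (l : List (List Char)) (h : ∀ tok ∈ l, pvSolid tok) :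
    PySem.Chars.strip (pvFwd l) = List.intercalate [' '] l := by
  cases hl : l with
  | nil => rfl
  | cons x xs =>
      subst hl
      rw [pv_fwd_inter _ (by simp)]
      obtain ⟨c, ys, hcy, hc⟩ := pv_inter_head _ (by simp) h
      obtain ⟨zs, d, hzd, hd⟩ := pv_inter_last _ (by simp) h
      unfold PySem.Chars.strip PySem.Chars.lstrip PySem.Chars.rstrip
      rw [hcy, List.cons_append]
      rw [List.dropWhile_cons_of_neg (by simp [hc])]
      rw [← List.cons_append, ← hcy, hzd]
      simp only [List.reverse_append, List.reverse_cons, List.reverse_nil, List.nil_append,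
        List.cons_append]
      rw [List.dropWhile_cons_of_pos (by decide), List.dropWhile_cons_of_neg (by simp [hd])]
      simp

theorem pv_strip_cat (ts : List (List Char)) (h : ∀ tok ∈ ts, pvSolid tok) :
    PySem.Chars.strip (pvCat ts) = PySem.Chars.join [' '] ts.reverse := by
  rw [pv_cat_eq_fwd, PySem.Chars.join]
  exact pv_strip_fwd _ (fun tok ht => h tok (List.mem_reverse.mp ht))

theorem pv_calcA_eq (s t : List Char) : pvCalcA s t = (pvDistB s t, pvOpsB s t) := by
  unfold pvCalcA pvDistB pvOpsB
  rw [pv_dp_eq]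
  exact congrArg _ (pv_strip_cat _ (pv_bt_solid s t _ _))

-- pairing of A's best-window fold with B's min?-fold over the same index list
def pvMinStep (key : Int → Int) (acc : Option Int) (x : Int) : Option Int :=
  match acc with
  | none => some x
  | some m => if key x < key m then some x else some m

theorem pv_min_eq (l : List Int) (key : Int → Int) :
    PySem.List.min? l key = l.foldl (pvMinStep key) none := by
  unfold PySem.List.min?
  congr 1
  funext acc x
  cases acc <;> rfl

theorem pv_pair (f : Int → Int × List Char) (segF : Int → List Char) (key : Int → Int)
    (hk : ∀ i, (f i).1 = key i) (l : List Int) :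
    ∀ (acc : Option Int) (st : Option Int × List Char × List Char × Option Int),
    ((acc = none ∧ st = (none, [], [], none)) ∨
      (∃ m, acc = some m ∧ st = (some (f m).1, segF m, (f m).2, some m))) →
    ((l.foldl (pvMinStep key) acc = none ∧
      l.foldl (fun st i =>
        if pvBetter st.1 (f i).1 then (some (f i).1, segF i, (f i).2, some i) else st) st
        = (none, [], [], none)) ∨
     (∃ m, l.foldl (pvMinStep key) acc = some m ∧
      l.foldl (fun st i =>
        if pvBetter st.1 (f i).1 then (some (f i).1, segF i, (f i).2, some i) else st) st
        = (some (f m).1, segF m, (f m).2, some m))) := by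
  induction l with
  | nil => intro acc st h; simpa using h
  | cons x xs ih =>
      intro acc st h
      rcases h with ⟨ha, hst⟩ | ⟨m, ha, hst⟩
      · subst ha; subst hst
        simp only [List.foldl_cons, pvMinStep, pvBetter, if_pos]
        exact ih _ _ (Or.inr ⟨x, rfl, rfl⟩)
      · subst ha; subst hst
        simp only [List.foldl_cons, pvMinStep, pvBetter]
        by_cases hlt : key x < key m
        · have hc : ((f x).1 < (f m).1) := by rw [hk x, hk m]; exact hlt
          rw [if_pos hlt, if_pos (by simpa using hc)]
          exact ih _ _ (Or.inr ⟨x, rfl, rfl⟩)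
        · have hc : ¬ ((f x).1 < (f m).1) := by rw [hk x, hk m]; exact hlt
          rw [if_neg hlt, if_neg (by simpa using hc)]
          exact ih _ _ (Or.inr ⟨m, rfl, rfl⟩)

-- ===== VERDICT (by name: the statement is the Claim_ definition above) =====
theorem find_most_similar_segment_spec : Claim_equal_find_most_similar_segment := by
  intro seq1 seq2 hdom hpre
  unfold Spec_find_most_similar_segment
  unfold find_most_similar_segment find_most_similar_segment_alt
  dsimp only
  rw [pv_min_eq]
  have hpair := pv_pair
      (fun i => pvCalcA (PySem.List.slice seq1.toList (some i) (some (i + (seq2.toList.length : Int)))) seq2.toList)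
      (fun i => PySem.List.slice seq1.toList (some i) (some (i + (seq2.toList.length : Int))))
      (fun i => pvDistB (PySem.List.slice seq1.toList (some i) (some (i + (seq2.toList.length : Int)))) seq2.toList)
      (fun i => by dsimp only; rw [pv_calcA_eq])
      (PySem.List.pyRange 0 ((seq1.toList.length : Int) - (seq2.toList.length : Int) + 1) 1)
      none (none, [], [], none) (Or.inl ⟨rfl, rfl⟩)
  beta_reduce at hpair
  rcases hpair with ⟨h1, h2⟩ | ⟨m, h1, h2⟩
  · rw [h1, h2]
  · rw [h1, h2]
    simp only [pv_calcA_eq]
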